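-- pv_equiv track=rewrite | github.com/jacobmr/hti5 | source/How to Summarize and Group Comments for Final Recommendations/cluster_and_analyze.py | analyze_org_types
-- ===== SOURCE A (Python) =====
-- from collections import defaultdict, Counter
--
-- def analyze_org_types(summaries):
--     """Analyze distribution by organization type."""
--     org_type_counts = Counter()
--     org_type_positions = defaultdict(list)
--
--     for s in summaries:
--         org_type = s.get('org_type', 'unknown')
--         position = s.get('position', 'unclear')
--         org_type_counts[org_type] += 1
--         org_type_positions[org_type].append(position)
--
--     return org_type_counts, org_type_positions
-- ===== SOURCE B (Python) =====
-- from collections import defaultdict, Counter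
--
-- def analyze_org_types(summaries):
--     """Analyze distribution by organization type."""
--     pairs = [(s.get('org_type', 'unknown'), s.get('position', 'unclear')) for s in summaries]
--     order = list(dict.fromkeys(t for t, _ in pairs))
--     org_type_counts = Counter({k: sum(1 for t, _ in pairs if t == k) for k in order})
--     org_type_positions = defaultdict(list, {k: [p for t, p in pairs if t == k] for k in order})
--     return org_type_counts, org_type_positions
-- ===== Notes on version B (the rewrite author's own statement) =====
-- stated objective: alternative
-- what changed: B replaces A's single lockstep loop maintaining a Counter and a groups dict with staged passes: extract the (org_type, position) pair list, compute first-occurrence key order with dict.fromkeys, then build counts and grouped positions by a per-key count/filter over the pair list.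
import Mathlib
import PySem

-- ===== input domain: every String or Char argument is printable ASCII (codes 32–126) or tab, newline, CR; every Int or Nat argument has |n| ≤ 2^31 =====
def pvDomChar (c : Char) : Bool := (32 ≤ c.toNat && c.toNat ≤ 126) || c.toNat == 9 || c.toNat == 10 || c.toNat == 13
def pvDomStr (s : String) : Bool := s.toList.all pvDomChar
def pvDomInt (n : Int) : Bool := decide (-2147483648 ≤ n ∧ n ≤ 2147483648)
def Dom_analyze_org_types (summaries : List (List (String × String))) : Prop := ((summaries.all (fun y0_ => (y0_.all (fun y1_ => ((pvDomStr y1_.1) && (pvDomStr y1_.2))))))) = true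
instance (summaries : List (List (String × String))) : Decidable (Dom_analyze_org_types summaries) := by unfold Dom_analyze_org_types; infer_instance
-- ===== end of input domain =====

-- B restructures A's single lockstep loop into staged passes (extract pairs, dedup keys,
-- per-key count/filter); same return value, ported as insertion-ordered association lists.
-- ===== PORT A =====
def analyze_org_types (summaries : List (List (String × String))) : (List (String × Int)) × (List (String × List String)) :=
  let st := summaries.foldl
    (fun (st : PySem.Dict String Int × PySem.Dict String (List String)) s =>
      let d := PySem.Dict.ofList s
      let org_type := d.getD "org_type" "unknown"
      let position := d.getD "position" "unclear"
      (st.1.modify org_type 0 (· + 1), st.2.modify org_type [] (· ++ [position])))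
    (PySem.Dict.empty, PySem.Dict.empty)
  (st.1.items, st.2.items)

-- ===== PORT B =====
-- staged: the (org_type, position) pair list, then first-occurrence key order
-- (dict.fromkeys = PySem.List.dedup), then a count / a filtered projection per key
def analyze_org_types_alt (summaries : List (List (String × String))) : (List (String × Int)) × (List (String × List String)) :=
  let pairs := summaries.map (fun s =>
    let d := PySem.Dict.ofList s
    (d.getD "org_type" "unknown", d.getD "position" "unclear"))
  let order := PySem.List.dedup (pairs.map (·.1))
  (order.map (fun k => (k, (pairs.countP (fun p => p.1 == k) : Int))),
   order.map (fun k => (k, (pairs.filter (fun p => p.1 == k)).map (·.2))))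

-- ===== PRECONDITION & SPEC =====
def Spec_analyze_org_types (summaries : List (List (String × String))) (out : (List (String × Int)) × (List (String × List String))) : Prop := out = analyze_org_types_alt summaries
instance (summaries : List (List (String × String))) (out : (List (String × Int)) × (List (String × List String))) : Decidable (Spec_analyze_org_types summaries out) := by unfold Spec_analyze_org_types; infer_instance

-- ===== CLAIM (what is proved, stated in full; the proofs are below) =====
def Claim_equal_analyze_org_types : Prop := ∀ (summaries : List (List (String × String))), Dom_analyze_org_types summaries → Spec_analyze_org_types summaries (analyze_org_types summaries)

-- ===== LEMMAS AND PROOFS =====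

-- A's loop, rewritten as a fold over the pair list B extracts
theorem pv_A_fold_over_pairs (summaries : List (List (String × String))) :
    (summaries.foldl
      (fun (st : PySem.Dict String Int × PySem.Dict String (List String)) s =>
        let d := PySem.Dict.ofList s
        let org_type := d.getD "org_type" "unknown"
        let position := d.getD "position" "unclear"
        (st.1.modify org_type 0 (· + 1), st.2.modify org_type [] (· ++ [position])))
      (PySem.Dict.empty, PySem.Dict.empty))
    = ((summaries.map (fun s =>
          let d := PySem.Dict.ofList s
          (d.getD "org_type" "unknown", d.getD "position" "unclear"))).foldl
        (fun (st : PySem.Dict String Int × PySem.Dict String (List String)) p =>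
          (st.1.modify p.1 0 (· + 1), st.2.modify p.1 [] (· ++ [p.2])))
        (PySem.Dict.empty, PySem.Dict.empty)) := by
  rw [List.foldl_map]

-- ===== VERDICT =====

theorem analyze_org_types_spec : Claim_equal_analyze_org_types := by
  intro summaries _
  unfold Spec_analyze_org_types analyze_org_types analyze_org_types_alt
  simp only [pv_A_fold_over_pairs]
  set pairs := summaries.map (fun s =>
    let d := PySem.Dict.ofList s
    (d.getD "org_type" "unknown", d.getD "position" "unclear")) with hpairs
  rw [PySem.List.foldl_prod_mk
      (f := fun (c : PySem.Dict String Int) (p : String × String) => c.modify p.1 0 (· + 1))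
      (g := fun (d : PySem.Dict String (List String)) (p : String × String) => d.modify p.1 [] (· ++ [p.2]))]
  simp only [Prod.mk.injEq]
  constructor
  · -- counter component
    have h1 : pairs.foldl (fun (c : PySem.Dict String Int) p => c.modify p.1 0 (· + 1)) PySem.Dict.empty
        = PySem.Dict.counter (pairs.map (·.1)) := by
      simp only [PySem.Dict.counter_eq_foldl, hpairs, List.map_map, List.foldl_map,
        Function.comp_def]
    rw [h1, PySem.Dict.items_counter]
    simp only [PySem.List.dedup_eq_ofList]
    apply List.map_congr_left
    intro k _
    simp [List.count_eq_countP, List.countP_map, Function.comp_def]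
  · -- positions component
    set d2 := pairs.foldl (fun (d : PySem.Dict String (List String)) p => d.modify p.1 [] (· ++ [p.2])) PySem.Dict.empty with hd2
    have hkeys : d2.keys = PySem.Set.ofList (pairs.map (·.1)) := by
      rw [hd2, PySem.Dict.keys_foldl_modify_key, PySem.Dict.keys_empty, PySem.Set.update_nil_left]
    have hnd : d2.keys.Nodup := by
      rw [hkeys]; exact PySem.Set.nodup_ofList _
    rw [PySem.Dict.items_eq_map_keys d2 hnd [], hkeys]
    simp only [PySem.List.dedup_eq_ofList]
    apply List.map_congr_left
    intro k _
    rw [hd2, PySem.Dict.getD_foldl_modify_append, PySem.Dict.getD_empty]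
    simp
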